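-- pv_equiv track=rewrite | github.com/17wadeche/validation_V2 | webapp.py | _order_keys_by_template
-- ===== SOURCE A (Python) =====
-- def _order_keys_by_template(keys: list[str], template_text: str) -> list[str]:
--     if not template_text:
--         return list(keys)
--     scored = []
--     for idx, k in enumerate(keys):
--         p = template_text.find(k)
--         scored.append((p if p != -1 else 10**18, idx, k))
--     scored.sort(key=lambda t: (t[0], t[1]))
--     return [k for _, _, k in scored]
-- ===== SOURCE B (Python) =====
-- def _order_keys_by_template(keys: list[str], template_text: str) -> list[str]:
--     if not template_text:
--         return list(keys)
--     BIG = 10 ** 18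
--     scores = [template_text.find(k) for k in keys]
--     scores = [BIG if s == -1 else s for s in scores]
--     out = []
--     for p in sorted(set(scores)):
--         for k, s in zip(keys, scores):
--             if s == p:
--                 out.append(k)
--     return out
-- ===== Notes on version B (the rewrite author's own statement) =====
-- stated objective: alternative
-- what changed: A decorates every key with (position, index), sorts the whole decorated list by the lexicographic pair key and strips the decoration; B never sorts the keys at all: it buckets keys by their first-occurrence position and emits the buckets while walking only the sorted DISTINCT positions, keeping input order inside each bucket.
import Mathlib
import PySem

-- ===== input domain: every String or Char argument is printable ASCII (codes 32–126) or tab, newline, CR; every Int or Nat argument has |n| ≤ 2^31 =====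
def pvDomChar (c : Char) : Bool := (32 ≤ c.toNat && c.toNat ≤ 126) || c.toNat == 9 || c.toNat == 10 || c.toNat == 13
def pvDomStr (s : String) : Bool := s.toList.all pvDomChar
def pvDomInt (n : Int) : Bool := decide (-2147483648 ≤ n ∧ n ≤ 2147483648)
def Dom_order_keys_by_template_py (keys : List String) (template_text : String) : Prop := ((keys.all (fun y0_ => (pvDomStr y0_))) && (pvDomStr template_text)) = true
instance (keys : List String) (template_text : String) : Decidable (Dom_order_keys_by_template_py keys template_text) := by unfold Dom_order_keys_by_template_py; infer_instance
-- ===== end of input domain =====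

-- B replaces A's decorate-with-index / lexicographic full sort / undecorate with a bucket pass:
-- sort only the DISTINCT first-occurrence positions and emit, per position, the keys in input order
-- (objective: alternative).

-- ===== PORT A =====
def order_keys_by_template_py (keys : List String) (template_text : String) : List String :=
  if template_text = "" then
    keys
  else
    let scored := (PySem.List.enumerate keys).foldl
      (fun acc ik =>
        let p := PySem.Str.find template_text ik.2
        acc ++ [((if p ≠ -1 then p else 10 ^ 18), ik.1, ik.2)]) []
    let sorted := PySem.List.sorted2 scored (fun t => t.1) (fun t => t.2.1)
    sorted.map (fun t => t.2.2)

-- ===== PORT B =====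
def order_keys_by_template_py_alt (keys : List String) (template_text : String) : List String :=
  if template_text = "" then
    keys
  else
    let scores0 := keys.map (fun k => PySem.Str.find template_text k)
    let scores := scores0.map (fun s => if s = -1 then 10 ^ 18 else s)
    (PySem.List.sorted (PySem.Set.ofList scores) (fun x => x)).foldl
      (fun out p =>
        (keys.zip scores).foldl
          (fun out ks => if ks.2 = p then out ++ [ks.1] else out) out)
      []

-- ===== PRECONDITION & SPEC =====
def Spec_order_keys_by_template_py (keys : List String) (template_text : String) (out : List String) : Prop := out = order_keys_by_template_py_alt keys template_text
instance (keys : List String) (template_text : String) (out : List String) : Decidable (Spec_order_keys_by_template_py keys template_text out) := by unfold Spec_order_keys_by_template_py; infer_instance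

-- ===== CLAIM (what is proved, stated in full; the proofs are below) =====
def Claim_equal_order_keys_by_template_py : Prop := ∀ (keys : List String) (template_text : String), Dom_order_keys_by_template_py keys template_text → Spec_order_keys_by_template_py keys template_text (order_keys_by_template_py keys template_text)

-- ===== LEMMAS AND PROOFS =====

-- the per-key score both programs compute: first occurrence, or 10^18 when absent
def pvScore (template_text : String) (k : String) : Int :=
  let p := PySem.Str.find template_text k
  if p = -1 then 10 ^ 18 else p

-- A's append loop builds the decorated list in closed form
lemma scored_gen (template_text : String) (l : List (Int × String)) (acc : List (Int × Int × String)) :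
    (l.foldl
      (fun acc ik =>
        let p := PySem.Str.find template_text ik.2
        acc ++ [((if p ≠ -1 then p else 10 ^ 18), ik.1, ik.2)]) acc)
    = acc ++ l.map (fun ik => (pvScore template_text ik.2, ik.1, ik.2)) := by
  induction l generalizing acc with
  | nil => simp
  | cons x t ih =>
    simp only [List.foldl_cons, List.map_cons, ih, List.append_assoc, List.singleton_append]
    congr 2
    simp only [pvScore]
    rcases em (PySem.Str.find template_text x.2 = -1) with h | h
    · rw [if_neg (not_not_intro h), if_pos h]
    · rw [if_pos h, if_neg h]

lemma enumerate_fst_ge (α : Type) (t : List α) (s : Int) (a : Int × α)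
    (hm : a ∈ PySem.List.enumerate t s) : s ≤ a.1 := by
  induction t generalizing s with
  | nil => simp [PySem.List.enumerate] at hm
  | cons y u ih =>
    simp only [PySem.List.enumerate, List.mem_cons] at hm
    rcases hm with h | h
    · simp [h]
    · have := ih (s + 1) h
      omega

-- enumerate has strictly increasing indices
lemma enumerate_pairwise (α : Type) (xs : List α) (start : Int) :
    (PySem.List.enumerate xs start).Pairwise (fun a b => a.1 < b.1) := by
  induction xs generalizing start with
  | nil => simp [PySem.List.enumerate]
  | cons x t ih =>
    simp only [PySem.List.enumerate, List.pairwise_cons]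
    refine ⟨fun a ha => ?_, ih (start + 1)⟩
    have h := enumerate_fst_ge α t (start + 1) a ha
    exact lt_of_lt_of_le (by omega : start < start + 1) h

lemma enumerate_map_snd (α : Type) (xs : List α) (start : Int) :
    (PySem.List.enumerate xs start).map (fun p => p.2) = xs := by
  induction xs generalizing start with
  | nil => simp [PySem.List.enumerate]
  | cons x t ih => simp [PySem.List.enumerate, ih]

-- sorted with a two-component key is sorted with the lexicographic product key
lemma sorted2_eq_sorted_lex (α : Type) (xs : List α) (k1 k2 : α → Int) :
    PySem.List.sorted2 xs k1 k2 = PySem.List.sorted xs (fun a => toLex (k1 a, k2 a)) := by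
  unfold PySem.List.sorted2 PySem.List.sorted
  simp only [if_neg (by simp : ¬ (false = true))]
  congr 1
  funext acc x
  congr 1
  funext a b
  simp only [Prod.Lex.toLex_lt_toLex]
  by_cases h1 : k1 a < k1 b <;> by_cases h2 : k1 b < k1 a <;> by_cases h3 : k2 a < k2 b <;>
    simp [h1, h2, h3] <;> omega

-- bucketing a list by the distinct values of a projection is a permutation of it
lemma flatMap_filter_perm (α : Type) (f : α → Int) (ps : List Int) (xs : List α)
    (hnd : ps.Nodup) (hmem : ∀ x ∈ xs, f x ∈ ps) :
    (ps.flatMap (fun p => xs.filter (fun x => f x = p))).Perm xs := by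
  induction ps generalizing xs with
  | nil =>
    have : xs = [] := by
      cases xs with
      | nil => rfl
      | cons y u => exact absurd (hmem y (by simp)) (by simp)
    simp [this]
  | cons p ps ih =>
    simp only [List.flatMap_cons]
    have hnd' := (List.nodup_cons.mp hnd).2
    have hpn : p ∉ ps := (List.nodup_cons.mp hnd).1
    have hmap : ps.flatMap (fun q => xs.filter (fun x => decide (f x = q)))
        = ps.flatMap (fun q => (xs.filter (fun x => !decide (f x = p))).filter (fun x => decide (f x = q))) := by
      apply List.flatMap_congr
      intro q hq
      rw [List.filter_filter]
      symm
      apply List.filter_congr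
      intro x _
      by_cases h : f x = q
      · simp [h]; exact fun hc => hpn (hc ▸ hq)
      · simp [h]
    rw [hmap]
    have hperm2 := ih (xs.filter (fun x => !decide (f x = p))) hnd'
      (by
        intro x hx
        have hx' := List.of_mem_filter hx
        have hxm := List.mem_of_mem_filter hx
        have := hmem x hxm
        simp at hx'
        simp only [List.mem_cons] at this
        tauto)
    exact (List.Perm.append_left _ hperm2).trans (List.filter_append_perm _ xs)

-- concatenating buckets in increasing order of (shared) first component,
-- each internally increasing in the middle component, is lexicographically increasing
lemma pairwise_buckets (h : Int → List (Int × Int × String)) (ps : List Int)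
    (hps : ps.Pairwise (· < ·))
    (hin : ∀ p, ∀ t ∈ h p, t.1 = p)
    (hbk : ∀ p, (h p).Pairwise (fun a b => a.2.1 < b.2.1)) :
    (ps.flatMap h).Pairwise
      (fun a b => (toLex (a.1, a.2.1) : Lex (Int × Int)) < toLex (b.1, b.2.1)) := by
  induction ps with
  | nil => simp
  | cons p ps ih =>
    simp only [List.flatMap_cons]
    rw [List.pairwise_append]
    refine ⟨?_, ih (List.Pairwise.sublist (List.sublist_cons_self p ps) hps), ?_⟩
    · refine List.Pairwise.imp_of_mem ?_ (hbk p)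
      intro a b ha hb hab
      rw [Prod.Lex.toLex_lt_toLex]
      right
      exact ⟨by rw [hin p a ha, hin p b hb], hab⟩
    · intro a ha b hb
      rcases List.mem_flatMap.mp hb with ⟨q, hq, hbq⟩
      have hpq : p < q := (List.pairwise_cons.mp hps).1 q hq
      have ha1 := hin p a ha
      have hb1 := hin q b hbq
      rw [Prod.Lex.toLex_lt_toLex]
      left
      rw [ha1, hb1]; exact hpq

lemma zip_map_self (α β : Type) (f : α → β) (xs : List α) :
    xs.zip (xs.map f) = xs.map (fun x => (x, f x)) := by
  induction xs with
  | nil => rfl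
  | cons x t ih => simp [ih]

-- B's inner loop in closed form
lemma inner_foldl (p : Int) (l : List (String × Int)) (acc : List String) :
    (l.foldl (fun out ks => if ks.2 = p then out ++ [ks.1] else out) acc)
    = acc ++ (l.filter (fun ks => ks.2 = p)).map (fun ks => ks.1) := by
  induction l generalizing acc with
  | nil => simp
  | cons x t ih =>
    by_cases h : x.2 = p <;> simp [h, ih]

-- ===== VERDICT (by name: the statement is the Claim_ definition above) =====
theorem order_keys_by_template_py_spec : Claim_equal_order_keys_by_template_py := by
  intro keys tt _
  show order_keys_by_template_py keys tt = order_keys_by_template_py_alt keys tt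
  unfold order_keys_by_template_py order_keys_by_template_py_alt
  by_cases ht : tt = ""
  · simp [ht]
  simp only [if_neg ht]
  -- names
  have hscores : (keys.map (fun k => PySem.Str.find tt k)).map
      (fun s => if s = -1 then 10 ^ 18 else s) = keys.map (fun k => pvScore tt k) := by
    rw [List.map_map]; rfl
  rw [hscores]
  set scores := keys.map (fun k => pvScore tt k) with hsc
  set ps := PySem.List.sorted (PySem.Set.ofList scores) (fun x => x) with hps
  set g : Int × String → Int × Int × String :=
    fun ik => (pvScore tt ik.2, ik.1, ik.2) with hg
  set enum := PySem.List.enumerate keys with henum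
  -- A's decorated list
  rw [scored_gen]
  simp only [List.nil_append]
  -- the sorted decorated list, characterised
  have hL : PySem.List.sorted2 (enum.map g) (fun t => t.1) (fun t => t.2.1)
      = ps.flatMap (fun p => (enum.map g).filter (fun t => t.1 = p)) := by
    rw [sorted2_eq_sorted_lex]
    apply PySem.List.sorted_eq_of_perm_of_pairwise_lt
    · refine flatMap_filter_perm _ (fun t => t.1) ps (enum.map g) ?_ ?_
      · exact ((PySem.List.sorted_perm _ _ _).nodup_iff).mpr (PySem.Set.nodup_ofList scores)
      · intro t hT
        rcases List.mem_map.mp hT with ⟨ik, hik, rfl⟩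
        have hk2 : ik.2 ∈ keys := by
          rw [← enumerate_map_snd String keys 0]
          exact List.mem_map_of_mem hik
        have : pvScore tt ik.2 ∈ scores := by
          rw [hsc]; exact List.mem_map_of_mem hk2
        rw [hps, PySem.List.mem_sorted, PySem.Set.mem_ofList]
        exact this
    · apply pairwise_buckets
      · exact PySem.List.sorted_ofList_pairwise_lt scores
      · intro p t hT
        have := List.of_mem_filter hT
        simpa using this
      · intro p
        apply List.Pairwise.filter
        rw [List.pairwise_map]
        exact enumerate_pairwise String keys 0
  rw [hL]
  -- both sides as buckets of plain keys
  rw [List.map_flatMap]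
  rw [zip_map_self]
  -- B's loops in closed form
  have houter : ∀ (qs : List Int) (acc : List String),
      qs.foldl (fun out p =>
        (keys.map (fun k => (k, pvScore tt k))).foldl
          (fun out ks => if ks.2 = p then out ++ [ks.1] else out) out) acc
      = acc ++ qs.flatMap (fun p =>
          ((keys.map (fun k => (k, pvScore tt k))).filter (fun ks => ks.2 = p)).map (fun ks => ks.1)) := by
    intro qs
    induction qs with
    | nil => simp
    | cons q qs ihq =>
      intro acc
      rw [List.foldl_cons, inner_foldl, ihq, List.flatMap_cons, List.append_assoc]
  rw [houter ps]
  simp only [List.nil_append]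
  apply List.flatMap_congr
  intro p _
  -- per bucket: both are keys.filter (pvScore = p), in input order
  rw [List.filter_map, List.filter_map, List.map_map, List.map_map]
  have h1 : ((fun t => decide (t.1 = p)) ∘ g) = fun ik : Int × String => decide (pvScore tt ik.2 = p) := rfl
  have h2 : ((fun ks : String × Int => decide (ks.2 = p)) ∘ (fun k => (k, pvScore tt k)))
      = fun k : String => decide (pvScore tt k = p) := rfl
  rw [h1, h2]
  have h3 : ((fun t : Int × Int × String => t.2.2) ∘ g) = fun ik : Int × String => ik.2 := rfl
  have h4 : ((fun ks : String × Int => ks.1) ∘ (fun k => (k, pvScore tt k))) = fun k : String => k := rfl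
  rw [h3, h4, List.map_id']
  -- move the filter through enumerate's projection
  have h5 : (enum.filter (fun ik => decide (pvScore tt ik.2 = p))).map (fun ik => ik.2)
      = (enum.map (fun ik => ik.2)).filter (fun k => decide (pvScore tt k = p)) := by
    rw [List.filter_map]; rfl
  rw [h5, henum, enumerate_map_snd]
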